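-- pv_equiv track=rewrite | github.com/pypi-data/pypi-mirror-392 | packages/ratisbona-utils/ratisbona_utils-0.0.4.tar.gz/ratisbona_utils-0.0.4/src/ratisbona_utils/binary/utf8.py | utf8_num_bytes
-- ===== SOURCE A (Python) =====
-- def utf8_num_bytes(the_first_byte: int) -> int:
--     """
--     Returns the number of bytes in a UTF-8 character, given the first byte.
--
--     Args:
--         the_first_byte (int): The first byte of the UTF-8 character.
--
--     Returns:
--         int: The number of bytes in the UTF-8 character
--     """
--     for count in range(0, 5):
--         if not (the_first_byte & 0x80):
--             # Number of leading 1's is number of bytes, except its starts with 0, then it's one byte.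
--             if count == 0:
--                 return 1
--             # Starting out with 10 is invalid!
--             if count == 1:
--                 raise ValueError("Invalid as UTF-8 first character. Cannot start with 0b10...")
--             return count
--
--         the_first_byte = (the_first_byte << 1) & 0xFF
--     raise ValueError("Invalid as UTF-8 first character. Seems to indicate more than 4 bytes?!??")
-- ===== SOURCE B (Python) =====
-- def utf8_num_bytes(the_first_byte: int) -> int:
--     """Number of bytes of a UTF-8 character from its first byte (range classification)."""
--     byte = the_first_byte & 0xFF
--     if byte < 0x80:
--         return 1
--     if byte < 0xC0:
--         raise ValueError("Invalid as UTF-8 first character. Cannot start with 0b10...")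
--     if byte < 0xE0:
--         return 2
--     if byte < 0xF0:
--         return 3
--     if byte < 0xF8:
--         return 4
--     raise ValueError("Invalid as UTF-8 first character. Seems to indicate more than 4 bytes?!??")
-- ===== Notes on version B (the rewrite author's own statement) =====
-- stated objective: simpler
-- what changed: Replaces the shift-and-count loop (repeatedly shifting the byte left and testing the top bit) with a single mask and direct ascending range comparisons on the low 8 bits.
import Mathlib
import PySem

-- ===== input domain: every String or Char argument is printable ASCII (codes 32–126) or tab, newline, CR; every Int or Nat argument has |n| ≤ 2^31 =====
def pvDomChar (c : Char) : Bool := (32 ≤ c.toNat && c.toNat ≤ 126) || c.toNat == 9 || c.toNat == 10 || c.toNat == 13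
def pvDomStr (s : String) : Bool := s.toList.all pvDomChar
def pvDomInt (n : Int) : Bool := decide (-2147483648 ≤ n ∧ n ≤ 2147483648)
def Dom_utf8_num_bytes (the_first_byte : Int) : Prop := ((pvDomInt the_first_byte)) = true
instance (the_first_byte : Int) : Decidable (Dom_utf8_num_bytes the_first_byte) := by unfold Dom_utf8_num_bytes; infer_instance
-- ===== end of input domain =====

-- B replaces A's shift-and-count loop with one mask and ascending range comparisons (simpler, same cost).
-- Both Pythons raise ValueError on continuation bytes (0x80..0xBF mod 256) and on >=0xF8; Pre_ excludes exactly those.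

-- ===== PORT A =====
-- the for-loop over range(0,5) with early returns; a raise is unreachable under Pre_ and ported as 0
def utf8Loop : List Int → Int → Int
  | [], _ => 0  -- raise ValueError (excluded by Pre_)
  | count :: rest, b =>
      if PySem.Int.band b 128 = 0 then
        if count = 0 then 1
        else if count = 1 then 0  -- raise ValueError (excluded by Pre_)
        else count
      else
        -- (b << 1) & 0xFF ; Python's `<< 1` on int is exactly `* 2`
        utf8Loop rest (PySem.Int.band (b * 2) 255)

def utf8_num_bytes (the_first_byte : Int) : Int :=
  utf8Loop (PySem.List.pyRange 0 5 1) the_first_byte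

-- ===== PORT B =====
def utf8_num_bytes_alt (the_first_byte : Int) : Int :=
  let byte := PySem.Int.band the_first_byte 255
  if byte < 128 then 1
  else if byte < 192 then 0  -- raise ValueError (excluded by Pre_)
  else if byte < 224 then 2
  else if byte < 240 then 3
  else if byte < 248 then 4
  else 0  -- raise ValueError (excluded by Pre_)

-- ===== PRECONDITION & SPEC =====
-- Pre_ excludes exactly the inputs on which A raises ValueError: low byte in [0x80,0xC0) or in [0xF8,0x100)
def Pre_utf8_num_bytes (the_first_byte : Int) : Prop :=
  PySem.Int.band the_first_byte 255 < 128 ∨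
  (192 ≤ PySem.Int.band the_first_byte 255 ∧ PySem.Int.band the_first_byte 255 < 248)
instance (the_first_byte : Int) : Decidable (Pre_utf8_num_bytes the_first_byte) := by
  unfold Pre_utf8_num_bytes; infer_instance
def pvWitness_utf8_num_bytes : Int := 226

def Spec_utf8_num_bytes (the_first_byte : Int) (out : Int) : Prop := out = utf8_num_bytes_alt the_first_byte
instance (the_first_byte : Int) (out : Int) : Decidable (Spec_utf8_num_bytes the_first_byte out) := by unfold Spec_utf8_num_bytes; infer_instance

-- ===== CLAIM (what is proved, stated in full; the proofs are below) =====
def Claim_equal_utf8_num_bytes : Prop := ∀ (the_first_byte : Int), Dom_utf8_num_bytes the_first_byte → Pre_utf8_num_bytes the_first_byte → Spec_utf8_num_bytes the_first_byte (utf8_num_bytes the_first_byte)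

-- ===== LEMMAS AND PROOFS =====

-- low-byte extraction: a & 0xFF is the Euclidean residue mod 256
theorem band_255_eq_emod (a : Int) : PySem.Int.band a 255 = a % 256 := by
  unfold PySem.Int.band
  split
  · norm_num
    rw [show Int.toNat 255 = 2 ^ 8 - 1 from rfl, Nat.and_two_pow_sub_one_eq_mod]
    omega
  · norm_num
    rw [show Int.toNat 255 = 2 ^ 8 - 1 from rfl, Nat.and_comm, Nat.and_two_pow_sub_one_eq_mod]
    omega

-- top-bit test: a & 0x80 is decided by the residue mod 256
theorem band_128_eq (a : Int) : PySem.Int.band a 128 = if a % 256 < 128 then 0 else 128 := by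
  unfold PySem.Int.band
  split
  · norm_num
    rw [show Int.toNat 128 = 2 ^ 7 from rfl, Nat.and_two_pow, Nat.testBit_eq_decide_div_mod_eq,
      show (2 ^ 7 : Nat) = 128 from rfl]
    by_cases h : a.toNat / 128 % 2 = 1 <;>
      simp only [h, decide_true, decide_false, Bool.toNat_true, Bool.toNat_false] <;> omega
  · norm_num
    rw [show Int.toNat 128 = 2 ^ 7 from rfl, Nat.and_comm, Nat.and_two_pow, Nat.testBit_eq_decide_div_mod_eq,
      show (2 ^ 7 : Nat) = 128 from rfl]
    by_cases h : ((-a).toNat - 1) / 128 % 2 = 1 <;>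
      simp only [h, decide_true, decide_false, Bool.toNat_true, Bool.toNat_false] <;> omega

-- A's loop depends only on the starting residue mod 256
theorem utf8Loop_emod (b : Int) :
    utf8Loop [0, 1, 2, 3, 4] b = utf8Loop [0, 1, 2, 3, 4] (b % 256) := by
  have h1 : PySem.Int.band b 128 = PySem.Int.band (b % 256) 128 := by
    rw [band_128_eq, band_128_eq, Int.emod_emod_of_dvd _ (by norm_num)]
  have h2 : PySem.Int.band (b * 2) 255 = PySem.Int.band (b % 256 * 2) 255 := by
    rw [band_255_eq_emod, band_255_eq_emod]; omega
  simp only [utf8Loop, h1, h2]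

-- B depends only on the starting residue mod 256
theorem alt_emod (b : Int) : utf8_num_bytes_alt b = utf8_num_bytes_alt (b % 256) := by
  unfold utf8_num_bytes_alt
  rw [band_255_eq_emod, band_255_eq_emod, Int.emod_emod_of_dvd _ (by norm_num)]

-- the finite core, checked for every residue
set_option maxRecDepth 8192 in
theorem core : ∀ r : Fin 256,
    ((r : Int) < 128 ∨ (192 ≤ (r : Int) ∧ (r : Int) < 248)) →
    utf8Loop [0, 1, 2, 3, 4] (r : Int) = utf8_num_bytes_alt (r : Int) := by decide

-- ===== VERDICT (by name: the statement is the Claim_ definition above) =====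
theorem utf8_num_bytes_spec : Claim_equal_utf8_num_bytes := by
  intro b _ hpre
  unfold Spec_utf8_num_bytes utf8_num_bytes
  have hR : PySem.List.pyRange 0 5 1 = [0, 1, 2, 3, 4] := by decide
  have hr0 : 0 ≤ b % 256 := Int.emod_nonneg _ (by norm_num)
  have hr1 : b % 256 < 256 := Int.emod_lt_of_pos _ (by norm_num)
  have hfin : ((⟨(b % 256).toNat, by omega⟩ : Fin 256) : Int) = b % 256 := by simp; omega
  rw [hR, utf8Loop_emod, alt_emod, ← hfin]
  apply core
  unfold Pre_utf8_num_bytes at hpre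
  rw [band_255_eq_emod] at hpre
  rw [hfin]
  exact hpre
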